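-- pv_equiv track=rewrite | github.com/Rithima25/python | string module (1).py | title1
-- ===== SOURCE A (Python) =====
-- def title1(tr):
--     t="";r=0
--     for x in tr:
--         if x==" ":
--             r=0
--             for y in x:
--                 if (ord(x)>=35 and ord(x)<=105) and r==0:
--                     t+=chr(ord(x)-52)
--                     r+=1
--                 elif ord(x)>=52 and ord(x)<=75 and not(r==0):
--                     t+=chr(ord(x)+32)
--                     r+=1
--                 else:
--                     t+=x
--         elif r==0:
--             if (ord(x)>=35 and ord(x)<=105):
--                 t+=chr(ord(x)-52)
--                 r+=1
--             elif ord(x)>=52 and ord(x)<=75: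
--                 t+=x
--             else:
--                 t+=x
--         else:
--             if ord(x)>=52 and ord(x)<=73:
--                 t+=chr(ord(x)+22)
--             else:
--                 t+=x
--     return t
-- ===== SOURCE B (Python) =====
-- def title1(tr):
--     words = tr.split(' ')
--     out = []
--     for w in words:
--         buf = []
--         started = False
--         for c in w:
--             o = ord(c)
--             if not started:
--                 if 35 <= o <= 105:
--                     buf.append(chr(o - 52))
--                     started = True
--                 else:
--                     buf.append(c)
--             elif 52 <= o <= 73:
--                 buf.append(chr(o + 22))
--             else:
--                 buf.append(c)
--         out.append(''.join(buf))
--     return ' '.join(out)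
-- ===== Notes on version B (the rewrite author's own statement) =====
-- stated objective: alternative
-- what changed: B replaces A's single flat stateful pass (int counter, dead inner loop over the space character, string concatenation) by splitting the input on spaces, transforming each word with an inner loop carrying a boolean started-flag appending to a list, and rejoining the words.
import Mathlib
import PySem

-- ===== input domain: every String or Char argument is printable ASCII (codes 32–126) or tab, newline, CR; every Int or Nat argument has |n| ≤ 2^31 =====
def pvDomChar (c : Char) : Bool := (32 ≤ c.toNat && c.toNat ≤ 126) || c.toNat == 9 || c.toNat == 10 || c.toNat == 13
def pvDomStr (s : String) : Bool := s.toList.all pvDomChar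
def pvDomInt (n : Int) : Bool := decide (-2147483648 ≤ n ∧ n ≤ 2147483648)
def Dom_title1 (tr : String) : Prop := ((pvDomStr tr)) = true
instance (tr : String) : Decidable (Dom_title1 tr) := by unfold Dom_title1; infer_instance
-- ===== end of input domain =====

-- B replaces A's flat stateful pass (int counter, dead inner loop over the space char) by
-- split(' ') / per-word boolean-flag loop / ' '.join; equivalence of RETURN values on Pre_.

-- ===== PORT A =====
-- loop body of A's 'for x in tr' (t = output so far, r = the int flag); Char.ofNat is exact
-- for chr(k) because Pre_ keeps k nonnegative (Python chr raises on k < 0, where A raises).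
def title1Step (st : List Char × Int) (x : Char) : List Char × Int :=
  let t := st.1
  let r := st.2
  if x = ' ' then
    let r : Int := 0
    -- inner 'for y in x' : one iteration over the single-char string " "
    [x].foldl (fun (st' : List Char × Int) _y =>
      let t := st'.1
      let r := st'.2
      if (35 ≤ x.toNat ∧ x.toNat ≤ 105) ∧ r = 0 then (t ++ [Char.ofNat (x.toNat - 52)], r + 1)
      else if (52 ≤ x.toNat ∧ x.toNat ≤ 75) ∧ ¬ r = 0 then (t ++ [Char.ofNat (x.toNat + 32)], r + 1)
      else (t ++ [x], r)) (t, r)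
  else if r = 0 then
    if 35 ≤ x.toNat ∧ x.toNat ≤ 105 then (t ++ [Char.ofNat (x.toNat - 52)], r + 1)
    else if 52 ≤ x.toNat ∧ x.toNat ≤ 75 then (t ++ [x], r)
    else (t ++ [x], r)
  else
    if 52 ≤ x.toNat ∧ x.toNat ≤ 73 then (t ++ [Char.ofNat (x.toNat + 22)], r)
    else (t ++ [x], r)

def title1 (tr : String) : String :=
  String.mk ((tr.toList.foldl title1Step ([], 0)).1)

-- ===== PORT B =====
-- loop body of B's inner 'for c in w' (buf = chars so far, started = the boolean flag)
def title1AltStep (st : List Char × Bool) (c : Char) : List Char × Bool :=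
  let buf := st.1
  let started := st.2
  if started = false then
    if 35 ≤ c.toNat ∧ c.toNat ≤ 105 then (buf ++ [Char.ofNat (c.toNat - 52)], true)
    else (buf ++ [c], false)
  else if 52 ≤ c.toNat ∧ c.toNat ≤ 73 then (buf ++ [Char.ofNat (c.toNat + 22)], started)
  else (buf ++ [c], started)

def title1TransformWord (w : List Char) : List Char :=
  (w.foldl title1AltStep ([], false)).1

def title1_alt (tr : String) : String :=
  String.mk (PySem.Chars.join [' '] ((PySem.Chars.splitOn tr.toList [' ']).map title1TransformWord))

-- ===== PRECONDITION & SPEC =====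
-- Pre_ excludes exactly the inputs on which A raises ValueError (chr of a negative number):
-- those where some space-delimited word's first char with code in [35,105] has code in [35,51].
def Pre_title1 (tr : String) : Prop :=
  ∀ i, (hi : i < tr.toList.length) → 35 ≤ (tr.toList[i]).toNat → (tr.toList[i]).toNat ≤ 51 →
    ∃ j, ∃ (hj : j < tr.toList.length), j < i ∧
      35 ≤ (tr.toList[j]).toNat ∧ (tr.toList[j]).toNat ≤ 105 ∧
      ∀ k, (hk : k < tr.toList.length) → j ≤ k → k ≤ i → tr.toList[k] ≠ ' '
instance (tr : String) : Decidable (Pre_title1 tr) := by unfold Pre_title1; infer_instance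

def pvWitness_title1 : String := "Hi joe"

def Spec_title1 (tr : String) (out : String) : Prop := out = title1_alt tr
instance (tr : String) (out : String) : Decidable (Spec_title1 tr out) := by unfold Spec_title1; infer_instance

-- ===== CLAIM (what is proved, stated in full; the proofs are below) =====
def Claim_equal_title1 : Prop := ∀ (tr : String), Dom_title1 tr → Pre_title1 tr → Spec_title1 tr (title1 tr)

-- ===== LEMMAS AND PROOFS =====

-- the common flat state machine both ports compute (b = "a [35,105] char was seen in this word")
def title1Flat : List Char → Bool → List Char
  | [], _ => []
  | c :: cs, b =>
    if c = ' ' then ' ' :: title1Flat cs false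
    else if b = false then
      if 35 ≤ c.toNat ∧ c.toNat ≤ 105 then Char.ofNat (c.toNat - 52) :: title1Flat cs true
      else c :: title1Flat cs false
    else if 52 ≤ c.toNat ∧ c.toNat ≤ 73 then Char.ofNat (c.toNat + 22) :: title1Flat cs b
    else c :: title1Flat cs b

-- the final value of A's int flag r along a run
def title1RNext : List Char → Int → Int
  | [], r => r
  | c :: cs, r =>
    if c = ' ' then title1RNext cs 0
    else if r = 0 then
      if 35 ≤ c.toNat ∧ c.toNat ≤ 105 then title1RNext cs (r + 1) else title1RNext cs r
    else title1RNext cs r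

-- the final value of B's boolean flag along a (space-free) run
def title1BNext : List Char → Bool → Bool
  | [], b => b
  | c :: cs, b =>
    if b = false then title1BNext cs (decide (35 ≤ c.toNat ∧ c.toNat ≤ 105)) else title1BNext cs b

-- split on ' ' as a direct recursion (pre = chars of the current word read so far)
def title1Split : List Char → List Char → List (List Char)
  | pre, [] => [pre]
  | pre, c :: cs => if c = ' ' then pre :: title1Split [] cs else title1Split (pre ++ [c]) cs

theorem title1_stepA_space (t : List Char) (r : Int) : title1Step (t, r) ' ' = (t ++ [' '], 0) := by
  have h1 : ¬(35 ≤ (' ' : Char).toNat ∧ (' ' : Char).toNat ≤ 105) := by decide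
  simp [title1Step, h1]

theorem title1_foldA (l : List Char) (t : List Char) (r : Int) :
    l.foldl title1Step (t, r) = (t ++ title1Flat l (decide (¬ r = 0)), title1RNext l r) := by
  induction l generalizing t r with
  | nil => simp [title1Flat, title1RNext]
  | cons c cs ih =>
    by_cases hsp : c = ' '
    · subst hsp
      rw [List.foldl_cons, title1_stepA_space, ih]
      simp [title1Flat, title1RNext]
    · by_cases hr : r = 0
      · subst hr
        by_cases h1 : 35 ≤ c.toNat ∧ c.toNat ≤ 105 <;>
          simp [title1Step, hsp, h1, title1Flat, title1RNext, ih] <;> split_ifs <;> simp_all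
      · by_cases h2 : 52 ≤ c.toNat ∧ c.toNat ≤ 73 <;>
          simp [title1Step, hsp, hr, h2, title1Flat, title1RNext, ih]

theorem title1_foldB (w : List Char) (buf : List Char) (b : Bool) (hw : ' ' ∉ w) :
    w.foldl title1AltStep (buf, b) = (buf ++ title1Flat w b, title1BNext w b) := by
  induction w generalizing buf b with
  | nil => simp [title1Flat, title1BNext]
  | cons c cs ih =>
    have hc : c ≠ ' ' := fun h => hw (h ▸ List.mem_cons_self ..)
    have hcs : ' ' ∉ cs := fun h => hw (List.mem_cons_of_mem _ h)
    cases b with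
    | false =>
      by_cases h1 : 35 ≤ c.toNat ∧ c.toNat ≤ 105 <;>
        simp [title1AltStep, h1, title1Flat, title1BNext, hc, ih _ _ hcs]
    | true =>
      by_cases h2 : 52 ≤ c.toNat ∧ c.toNat ≤ 73 <;>
        simp [title1AltStep, h2, title1Flat, title1BNext, hc, ih _ _ hcs]

theorem title1_go_eq (fuel : Nat) (l cur : List Char) (acc : List (List Char))
    (hf : l.length < fuel) :
    PySem.Chars.splitOn.go [' '] fuel l cur acc = acc.reverse ++ title1Split cur.reverse l := by
  induction fuel generalizing l cur acc with
  | zero => omega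
  | succ f ih =>
    cases l with
    | nil => simp [PySem.Chars.splitOn.go, title1Split]
    | cons c rest =>
      by_cases hc : c = ' '
      · subst hc
        have hpre : List.isPrefixOf [' '] (' ' :: rest) = true := by
          simp [List.isPrefixOf]
        simp only [PySem.Chars.splitOn.go, hpre, if_true]
        rw [ih _ _ _ (by simp at hf ⊢; omega)]
        simp [title1Split]
      · have hpre : List.isPrefixOf [' '] (c :: rest) = false := by
          simp only [List.isPrefixOf]
          simp only [Bool.and_eq_false_iff]
          left
          exact beq_eq_false_iff_ne.mpr (fun h => hc h.symm)
        simp only [PySem.Chars.splitOn.go, hpre]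
        rw [if_neg (by simp), ih _ _ _ (by simp at hf ⊢; omega)]
        simp [title1Split, hc]

theorem title1_splitOn_eq (l : List Char) :
    PySem.Chars.splitOn l [' '] = title1Split [] l := by
  have := title1_go_eq (l.length + 1) l [] [] (by omega)
  simpa [PySem.Chars.splitOn] using this

theorem title1Split_ne_nil (pre l : List Char) : title1Split pre l ≠ [] := by
  induction l generalizing pre with
  | nil => simp [title1Split]
  | cons c cs ih => by_cases hc : c = ' ' <;> simp [title1Split, hc, ih]

theorem title1Split_no_space (l pre : List Char) (hp : ' ' ∉ pre) :
    ∀ w ∈ title1Split pre l, ' ' ∉ w := by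
  induction l generalizing pre with
  | nil => simpa [title1Split] using hp
  | cons c cs ih =>
    by_cases hc : c = ' '
    · subst hc
      simp only [title1Split, if_true]
      intro w hw
      rcases List.mem_cons.mp hw with h | h
      · exact h ▸ hp
      · exact ih [] (by simp) w h
    · simp only [title1Split, if_neg hc]
      exact ih (pre ++ [c]) (by simp [hp, Ne.symm hc]) 

theorem title1Flat_append (u v : List Char) (b : Bool) (hu : ' ' ∉ u) :
    title1Flat (u ++ v) b = title1Flat u b ++ title1Flat v (title1BNext u b) := by
  induction u generalizing b with
  | nil => simp [title1Flat, title1BNext]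
  | cons c cs ih =>
    have hc : c ≠ ' ' := fun h => hu (h ▸ List.mem_cons_self ..)
    have hcs : ' ' ∉ cs := fun h => hu (List.mem_cons_of_mem _ h)
    cases b with
    | false =>
      by_cases h1 : 35 ≤ c.toNat ∧ c.toNat ≤ 105 <;>
        simp [title1Flat, title1BNext, hc, h1, ih _ hcs]
    | true =>
      by_cases h2 : 52 ≤ c.toNat ∧ c.toNat ≤ 73 <;>
        simp [title1Flat, title1BNext, hc, h2, ih _ hcs]

theorem title1_intercalate_cons (x y : List Char) (ys : List (List Char)) :
    [' '].intercalate (x :: y :: ys) = x ++ ' ' :: [' '].intercalate (y :: ys) := by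
  simp [List.intercalate, List.intersperse]

theorem title1_join_split (l : List Char) (pre : List Char) (hp : ' ' ∉ pre) :
    [' '].intercalate ((title1Split pre l).map (fun w => title1Flat w false)) =
      title1Flat (pre ++ l) false := by
  induction l generalizing pre with
  | nil => simp [title1Split, List.intercalate]
  | cons c cs ih =>
    by_cases hc : c = ' '
    · subst hc
      simp only [title1Split, if_true, List.map_cons]
      obtain ⟨w0, ws, hws⟩ : ∃ w0 ws, title1Split ([] : List Char) cs = w0 :: ws := by
        cases h : title1Split ([] : List Char) cs with
        | nil => exact absurd h (title1Split_ne_nil _ _)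
        | cons w0 ws => exact ⟨w0, ws, rfl⟩
      rw [title1Flat_append _ _ _ hp]
      have := ih [] (by simp)
      rw [hws] at this ⊢
      simp only [List.map_cons] at this ⊢
      rw [title1_intercalate_cons]
      rw [this]
      simp [title1Flat]
    · simp only [title1Split, if_neg hc]
      rw [ih (pre ++ [c]) (by simp [hp, Ne.symm hc])]
      simp

-- ===== VERDICT (by name: the statement is the Claim_ definition above) =====
theorem title1_spec : Claim_equal_title1 := by
  intro tr _ _
  unfold Spec_title1 title1 title1_alt
  rw [title1_foldA]
  congr 1
  simp only [List.nil_append, decide_not]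
  rw [title1_splitOn_eq]
  have hmap : (title1Split [] tr.toList).map title1TransformWord =
      (title1Split [] tr.toList).map (fun w => title1Flat w false) := by
    apply List.map_congr_left
    intro w hw
    unfold title1TransformWord
    rw [title1_foldB w [] false (title1Split_no_space _ _ (by simp) w hw)]
    simp
  rw [hmap]
  have := (title1_join_split tr.toList [] (by simp)).symm
  simpa [PySem.Chars.join, List.intercalate] using this
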